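-- pv_equiv track=rewrite | github.com/JeanphiloGong/tsingai-lens | backend/application/core/semantic_build/paper_facts_service.py | _derive_traceback_status
-- ===== SOURCE A (Python) =====
-- from typing import Any
--
-- def _derive_traceback_status(anchors: list[dict[str, Any]]) -> str:
--     if any(
--         str(anchor.get("locator_type")) in {"char_range", "bbox"}
--         and str(anchor.get("locator_confidence")) in {"high", "medium"}
--         for anchor in anchors
--     ):
--         return "ready"
--     if any(
--         str(anchor.get("locator_type")) in {"char_range", "bbox", "section"}
--         for anchor in anchors
--     ):
--         return "partial"
--     return "unavailable"
-- ===== SOURCE B (Python) =====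
-- def _derive_traceback_status(anchors):
--     found_ready = False
--     found_partial = False
--     for anchor in anchors:
--         lt = str(anchor.get("locator_type"))
--         if lt in ("char_range", "bbox", "section"):
--             found_partial = True
--             if lt != "section" and str(anchor.get("locator_confidence")) in ("high", "medium"):
--                 found_ready = True
--     if found_ready:
--         return "ready"
--     if found_partial:
--         return "partial"
--     return "unavailable"
-- ===== Notes on version B (the rewrite author's own statement) =====
-- stated objective: alternative
-- what changed: Two sequential any-scans are replaced by a single loop that maintains found_ready/found_partial flags and decides the status once after the pass.
import Mathlib
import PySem

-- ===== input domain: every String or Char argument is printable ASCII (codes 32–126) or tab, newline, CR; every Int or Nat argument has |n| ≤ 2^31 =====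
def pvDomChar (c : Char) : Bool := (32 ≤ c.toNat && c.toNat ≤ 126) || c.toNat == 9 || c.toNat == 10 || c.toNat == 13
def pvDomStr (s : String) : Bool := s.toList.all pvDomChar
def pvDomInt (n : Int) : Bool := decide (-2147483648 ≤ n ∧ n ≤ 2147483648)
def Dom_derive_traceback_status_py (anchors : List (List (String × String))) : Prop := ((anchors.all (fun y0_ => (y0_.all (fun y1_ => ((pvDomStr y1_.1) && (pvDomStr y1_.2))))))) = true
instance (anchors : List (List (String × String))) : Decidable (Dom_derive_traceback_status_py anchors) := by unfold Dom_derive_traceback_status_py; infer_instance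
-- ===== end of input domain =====

-- ===== PORT A =====
-- B changes only the decomposition: one flag-maintaining pass instead of A's two any-scans; same values.
-- str(d.get(k)): first-match lookup, "None" when the key is absent (exact on string-valued dicts).
def pyGetStr (d : List (String × String)) (k : String) : String :=
  match (PySem.Dict.mk d).get? k with
  | some v => v
  | none => "None"

def derive_traceback_status_py (anchors : List (List (String × String))) : String :=
  if anchors.any (fun anchor =>
      (pyGetStr anchor "locator_type" == "char_range" || pyGetStr anchor "locator_type" == "bbox")
      && (pyGetStr anchor "locator_confidence" == "high" || pyGetStr anchor "locator_confidence" == "medium"))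
  then "ready"
  else if anchors.any (fun anchor =>
      pyGetStr anchor "locator_type" == "char_range" || pyGetStr anchor "locator_type" == "bbox"
      || pyGetStr anchor "locator_type" == "section")
  then "partial"
  else "unavailable"

-- ===== PORT B =====
-- B's loop body: update the (found_ready, found_partial) flags for one anchor
def stepB (st : Bool × Bool) (anchor : List (String × String)) : Bool × Bool :=
  let lt := pyGetStr anchor "locator_type"
  if lt == "char_range" || lt == "bbox" || lt == "section" then
    if lt != "section"
       && (pyGetStr anchor "locator_confidence" == "high"
           || pyGetStr anchor "locator_confidence" == "medium")
    then (true, true)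
    else (st.1, true)
  else st

def derive_traceback_status_py_alt (anchors : List (List (String × String))) : String :=
  let flags := anchors.foldl stepB (false, false)
  if flags.1 then "ready"
  else if flags.2 then "partial"
  else "unavailable"

-- ===== PRECONDITION & SPEC =====
def Spec_derive_traceback_status_py (anchors : List (List (String × String))) (out : String) : Prop := out = derive_traceback_status_py_alt anchors
instance (anchors : List (List (String × String))) (out : String) : Decidable (Spec_derive_traceback_status_py anchors out) := by unfold Spec_derive_traceback_status_py; infer_instance

-- ===== CLAIM (what is proved, stated in full; the proofs are below) =====
def Claim_equal_derive_traceback_status_py : Prop := ∀ (anchors : List (List (String × String))), Dom_derive_traceback_status_py anchors → Spec_derive_traceback_status_py anchors (derive_traceback_status_py anchors)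

-- ===== LEMMAS AND PROOFS =====
def readyCond (anchor : List (String × String)) : Bool :=
  (pyGetStr anchor "locator_type" == "char_range" || pyGetStr anchor "locator_type" == "bbox")
  && (pyGetStr anchor "locator_confidence" == "high" || pyGetStr anchor "locator_confidence" == "medium")

def partialCond (anchor : List (String × String)) : Bool :=
  pyGetStr anchor "locator_type" == "char_range" || pyGetStr anchor "locator_type" == "bbox"
  || pyGetStr anchor "locator_type" == "section"

theorem stepB_eq (st : Bool × Bool) (a : List (String × String)) :
    stepB st a = (st.1 || readyCond a, st.2 || partialCond a) := by
  obtain ⟨r, p⟩ := st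
  unfold stepB readyCond partialCond
  by_cases hs : pyGetStr a "locator_type" = "section"
  · simp [hs]
  · by_cases hc : pyGetStr a "locator_type" = "char_range"
    · simp [hc]
      by_cases hh : (pyGetStr a "locator_confidence" = "high" ∨ pyGetStr a "locator_confidence" = "medium") <;>
        simp_all
    · by_cases hb : pyGetStr a "locator_type" = "bbox"
      · simp [hb]
        by_cases hh : (pyGetStr a "locator_confidence" = "high" ∨ pyGetStr a "locator_confidence" = "medium") <;>
          simp_all
      · simp [hs, hc, hb]

theorem foldB_eq (anchors : List (List (String × String))) (r p : Bool) :
    anchors.foldl stepB (r, p) = (r || anchors.any readyCond, p || anchors.any partialCond) := by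
  induction anchors generalizing r p with
  | nil => simp
  | cons a t ih =>
      simp [List.foldl_cons, stepB_eq, ih, List.any_cons, Bool.or_assoc]

-- ===== VERDICT (by name: the statement is the Claim_ definition above) =====
theorem derive_traceback_status_py_spec : Claim_equal_derive_traceback_status_py := by
  intro anchors _
  unfold Spec_derive_traceback_status_py derive_traceback_status_py derive_traceback_status_py_alt
  have h : anchors.foldl stepB (false, false)
      = (anchors.any readyCond, anchors.any partialCond) := by
    simpa using foldB_eq anchors false false
  rw [h]
  rfl
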